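-- pv_equiv track=rewrite | github.com/krid78/Advent_of_Code | 2024/python/day15.py | get_data_part1
-- ===== SOURCE A (Python) =====
-- def get_data_part1(map_data):
--     walls = set()
--     boxes = set()
--
--     for r in range(len(map_data)):
--         for c in range(len(map_data[0])):
--             if map_data[r][c] == "#":
--                 walls.add((r, c))
--             elif map_data[r][c] == "O":
--                 boxes.add((r, c))
--             elif map_data[r][c] == "@":
--                 bot_pos = (r, c)
--
--     return walls, boxes, bot_pos
-- ===== SOURCE B (Python) =====
-- def get_data_part1(map_data):
--     height, width = len(map_data), len(map_data[0])
--     cells = [((r, c), map_data[r][c]) for r in range(height) for c in range(width)]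
--     walls = {pos for pos, ch in cells if ch == "#"}
--     boxes = {pos for pos, ch in cells if ch == "O"}
--     for pos, ch in cells:
--         if ch == "@":
--             bot_pos = pos
--     return walls, boxes, bot_pos
-- ===== Notes on version B (the rewrite author's own statement) =====
-- stated objective: alternative
-- what changed: Instead of A's single nested index loop classifying each cell into one of three accumulators via an if/elif chain, B materialises the height-by-width cell list once and then classifies by value: two set comprehensions over the cells for walls and boxes, plus a separate pass recording the bot position.
import Mathlib
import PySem

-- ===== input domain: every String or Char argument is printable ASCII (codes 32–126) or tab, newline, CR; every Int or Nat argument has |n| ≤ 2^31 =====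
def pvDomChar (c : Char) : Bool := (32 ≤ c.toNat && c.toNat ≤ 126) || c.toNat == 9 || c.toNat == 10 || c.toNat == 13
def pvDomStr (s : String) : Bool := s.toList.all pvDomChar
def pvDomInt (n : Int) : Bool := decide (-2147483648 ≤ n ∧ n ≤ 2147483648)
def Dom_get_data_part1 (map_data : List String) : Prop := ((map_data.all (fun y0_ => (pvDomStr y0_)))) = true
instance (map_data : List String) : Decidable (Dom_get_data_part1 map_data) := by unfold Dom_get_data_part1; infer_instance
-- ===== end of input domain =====

-- B materialises the height-by-width cell list once and classifies cells by value (two set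
-- comprehensions plus a bot-position pass) instead of A's single nested classifying loop ("alternative").

-- ===== PORT A =====
-- A's 'bot_pos' is an unbound local until the first '@'; ported as an Option, forced some by Pre_.
def get_data_part1 (map_data : List String) : (List (Int × Int)) × (List (Int × Int)) × (Int × Int) :=
  let res := (PySem.List.pyRange 0 (PySem.List.len map_data) 1).foldl (fun st r =>
      (PySem.List.pyRange 0 (PySem.Str.len (PySem.List.pyGetD map_data 0 "")) 1).foldl (fun st c =>
        let ch? := PySem.Str.pyGet? (PySem.List.pyGetD map_data r "") c
        if ch? = some '#' then (PySem.Set.add st.1 (r, c), st.2.1, st.2.2)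
        else if ch? = some 'O' then (st.1, PySem.Set.add st.2.1 (r, c), st.2.2)
        else if ch? = some '@' then (st.1, st.2.1, some (r, c))
        else st) st)
    (([], [], none) : PySem.Set (Int × Int) × PySem.Set (Int × Int) × Option (Int × Int))
  (res.1, res.2.1, (res.2.2).getD (0, 0))

-- ===== PORT B =====
-- map_data[r][c] raises IndexError when a row is shorter than the first; Pre_ excludes that, so
-- the port reads it with a default ' '. B's 'bot_pos' is likewise an Option forced some by Pre_.
def get_data_part1_alt (map_data : List String) : (List (Int × Int)) × (List (Int × Int)) × (Int × Int) :=
  let height := PySem.List.len map_data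
  let width := PySem.Str.len (PySem.List.pyGetD map_data 0 "")
  let cells : List ((Int × Int) × Char) :=
    (PySem.List.pyRange 0 height 1).flatMap (fun r =>
      (PySem.List.pyRange 0 width 1).map (fun c =>
        ((r, c), (PySem.Str.pyGet? (PySem.List.pyGetD map_data r "") c).getD ' ')))
  let walls : PySem.Set (Int × Int) :=
    PySem.Set.ofList (cells.filterMap (fun pc => if pc.2 = '#' then some pc.1 else none))
  let boxes : PySem.Set (Int × Int) :=
    PySem.Set.ofList (cells.filterMap (fun pc => if pc.2 = 'O' then some pc.1 else none))
  let bot : Option (Int × Int) :=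
    cells.foldl (fun p pc => if pc.2 = '@' then some pc.1 else p) none
  (walls, boxes, bot.getD (0, 0))

-- ===== PRECONDITION & SPEC =====
-- Pre_ excludes exactly the inputs on which A raises: an empty grid or a grid with no '@' in the
-- scanned region (bot_pos stays unbound: UnboundLocalError), or a row shorter than the first row
-- (map_data[r][c] raises IndexError).
def Pre_get_data_part1 (map_data : List String) : Prop :=
  map_data ≠ [] ∧
  (∀ s ∈ map_data, (map_data.headD "").toList.length ≤ s.toList.length) ∧
  ∃ s ∈ map_data, '@' ∈ s.toList.take ((map_data.headD "").toList.length)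
instance (map_data : List String) : Decidable (Pre_get_data_part1 map_data) := by
  unfold Pre_get_data_part1; infer_instance

def pvWitness_get_data_part1 : List String := ["#O@"]

def Spec_get_data_part1 (map_data : List String) (out : (List (Int × Int)) × (List (Int × Int)) × (Int × Int)) : Prop := out = get_data_part1_alt map_data
instance (map_data : List String) (out : (List (Int × Int)) × (List (Int × Int)) × (Int × Int)) : Decidable (Spec_get_data_part1 map_data out) := by unfold Spec_get_data_part1; infer_instance

-- ===== CLAIM (what is proved, stated in full; the proofs are below) =====
def Claim_equal_get_data_part1 : Prop := ∀ (map_data : List String), Dom_get_data_part1 map_data → Pre_get_data_part1 map_data → Spec_get_data_part1 map_data (get_data_part1 map_data)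

-- ===== LEMMAS AND PROOFS =====

lemma pv_foldl_flatMap {α β σ : Type} (F : α → List β) (step : σ → β → σ) :
    ∀ (l : List α) (init : σ),
      (l.flatMap F).foldl step init = l.foldl (fun acc a => (F a).foldl step acc) init := by
  intro l
  induction l with
  | nil => intro init; rfl
  | cons a t ih =>
    intro init
    rw [List.flatMap_cons, List.foldl_append, List.foldl_cons, ih]

lemma pv_cells_gen (l : List Char) (w0 : Nat) (hw : w0 ≤ l.length) (ch : Char) (r : Int) :
    ∀ (cs : List Nat), (∀ c ∈ cs, c < w0) → ∀ (W : PySem.Set (Int × Int)),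
      cs.foldl
          (fun (W : PySem.Set (Int × Int)) (c : Nat) =>
            if l[c]? = some ch then PySem.Set.add W (r, (c : Int)) else W) W =
        PySem.Set.update W
          (cs.filterMap (fun c =>
            if l.getD c ' ' = ch then some (r, (c : Int)) else none)) := by
  intro cs
  induction cs with
  | nil => intro _ W; simp [PySem.Set.update]
  | cons c t ih =>
    intro hcs W
    have hc : c < w0 := hcs c (List.mem_cons_self ..)
    have hc' : c < l.length := lt_of_lt_of_le hc hw
    have hget : l.getD c ' ' = l[c] := List.getD_eq_getElem _ _ hc'
    have hiff : (l[c]? = some ch) ↔ (l.getD c ' ' = ch) := by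
      rw [List.getElem?_eq_getElem hc', hget, Option.some_inj]
    rw [List.foldl_cons, List.filterMap_cons]
    by_cases h : l[c]? = some ch
    · rw [if_pos h, if_pos (hiff.mp h), ih (fun x hx => hcs x (List.mem_cons_of_mem _ hx))]
      simp [PySem.Set.update]
    · rw [if_neg h, if_neg (fun hc2 => h (hiff.mpr hc2)),
        ih (fun x hx => hcs x (List.mem_cons_of_mem _ hx))]

lemma pv_foldl_prod3 {ι α β γ : Type} (f : α → ι → α) (g : β → ι → β) (h : γ → ι → γ) :
    ∀ (l : List ι) (a : α) (b : β) (c : γ),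
      l.foldl (fun s x => (f s.1 x, g s.2.1 x, h s.2.2 x)) (a, b, c) =
        (l.foldl f a, l.foldl g b, l.foldl h c) := by
  intro l
  induction l with
  | nil => intro a b c; rfl
  | cons x t ih => intro a b c; simpa using ih (f a x) (g b x) (h c x)

lemma pv_foldl_update {ι : Type} (F : ι → List (Int × Int)) :
    ∀ (rs : List ι) (W : PySem.Set (Int × Int)),
      rs.foldl (fun W r => PySem.Set.update W (F r)) W =
        PySem.Set.update W (rs.flatMap F) := by
  intro rs
  induction rs with
  | nil => intro W; simp [PySem.Set.update]
  | cons r t ih =>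
    intro W
    rw [List.foldl_cons, ih, List.flatMap_cons]
    simp [PySem.Set.update, List.foldl_append]

lemma pv_update_nil (xs : List (Int × Int)) :
    PySem.Set.update ([] : PySem.Set (Int × Int)) xs = PySem.Set.ofList xs := by
  rw [PySem.Set.ofList_eq_foldl]; rfl

-- B's per-row bot scan agrees with A's when every scanned column is in range
lemma pv_row_bot (l : List Char) (w0 : Nat) (hw : w0 ≤ l.length) (r : Int)
    (P : Option (Int × Int)) :
    (List.range w0).foldl (fun (p : Option (Int × Int)) (c : Nat) =>
        if l[c]?.getD ' ' = '@' then some (r, (c : Int)) else p) P =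
      (List.range w0).foldl (fun (p : Option (Int × Int)) (c : Nat) =>
        if l[c]? = some '@' then some (r, (c : Int)) else p) P := by
  apply PySem.List.foldl_congr_mem
  intro p c hc
  rw [List.mem_range] at hc
  have hc' : c < l.length := lt_of_lt_of_le hc hw
  simp only [List.getElem?_eq_getElem hc', Option.getD_some, Option.some_inj]

theorem get_data_part1_eq (map_data : List String) (h : Pre_get_data_part1 map_data) :
    get_data_part1 map_data = get_data_part1_alt map_data := by
  obtain ⟨hne, hrows, -⟩ := h
  obtain ⟨h0, rest, rfl⟩ : ∃ a t, map_data = a :: t := by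
    cases map_data with
    | nil => exact absurd rfl hne
    | cons a t => exact ⟨a, t, rfl⟩
  simp only [get_data_part1, get_data_part1_alt]
  set md := h0 :: rest with hmd
  set w0 := h0.toList.length with hw0
  set n := md.length with hn
  have hwidthA : PySem.Str.len (PySem.List.pyGetD md 0 "") = (w0 : Int) := by
    rw [PySem.List.pyGetD_zero]
    simp [PySem.Str.len, hmd, hw0, String.length_toList]
  have hlenmd : PySem.List.len md = (n : Int) := PySem.List.len_eq md
  have hwle : ∀ rn : Nat, rn < n → w0 ≤ ((md.getD rn "").toList).length := by
    intro rn hrn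
    rw [List.getD_eq_getElem _ _ hrn]
    exact hrows _ (List.getElem_mem hrn)
  rw [hwidthA, hlenmd]
  simp only [PySem.List.pyRange_zero_natCast, List.foldl_map, List.flatMap_map, List.map_map,
    List.filterMap_flatMap, List.filterMap_map, PySem.List.pyGetD_natCast,
    PySem.Str.pyGet?_natCast, pv_foldl_flatMap, Function.comp]
  -- split A's triple-state fold into three independent folds
  have hsplit :
      (List.range n).foldl (fun (st : PySem.Set (Int × Int) × PySem.Set (Int × Int) × Option (Int × Int)) (rn : Nat) =>
        (List.range w0).foldl (fun st (cn : Nat) =>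
          if ((md.getD rn "").toList)[cn]? = some '#' then (PySem.Set.add st.1 ((rn : Int), (cn : Int)), st.2.1, st.2.2)
          else if ((md.getD rn "").toList)[cn]? = some 'O' then (st.1, PySem.Set.add st.2.1 ((rn : Int), (cn : Int)), st.2.2)
          else if ((md.getD rn "").toList)[cn]? = some '@' then (st.1, st.2.1, some ((rn : Int), (cn : Int)))
          else st) st) ([], [], none) =
      ((List.range n).foldl (fun W rn =>
          (List.range w0).foldl (fun (W : PySem.Set (Int × Int)) (cn : Nat) =>
            if ((md.getD rn "").toList)[cn]? = some '#' then PySem.Set.add W ((rn : Int), (cn : Int)) else W) W) [],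
       (List.range n).foldl (fun B rn =>
          (List.range w0).foldl (fun (B : PySem.Set (Int × Int)) (cn : Nat) =>
            if ((md.getD rn "").toList)[cn]? = some 'O' then PySem.Set.add B ((rn : Int), (cn : Int)) else B) B) [],
       (List.range n).foldl (fun P rn =>
          (List.range w0).foldl (fun (P : Option (Int × Int)) (cn : Nat) =>
            if ((md.getD rn "").toList)[cn]? = some '@' then some ((rn : Int), (cn : Int)) else P) P) none) := by
    have hstep : (fun (st : PySem.Set (Int × Int) × PySem.Set (Int × Int) × Option (Int × Int)) (rn : Nat) =>
        (List.range w0).foldl (fun st (cn : Nat) =>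
          if ((md.getD rn "").toList)[cn]? = some '#' then (PySem.Set.add st.1 ((rn : Int), (cn : Int)), st.2.1, st.2.2)
          else if ((md.getD rn "").toList)[cn]? = some 'O' then (st.1, PySem.Set.add st.2.1 ((rn : Int), (cn : Int)), st.2.2)
          else if ((md.getD rn "").toList)[cn]? = some '@' then (st.1, st.2.1, some ((rn : Int), (cn : Int)))
          else st) st) =
        (fun st rn =>
          ((List.range w0).foldl (fun (W : PySem.Set (Int × Int)) (cn : Nat) =>
            if ((md.getD rn "").toList)[cn]? = some '#' then PySem.Set.add W ((rn : Int), (cn : Int)) else W) st.1,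
           (List.range w0).foldl (fun (B : PySem.Set (Int × Int)) (cn : Nat) =>
            if ((md.getD rn "").toList)[cn]? = some 'O' then PySem.Set.add B ((rn : Int), (cn : Int)) else B) st.2.1,
           (List.range w0).foldl (fun (P : Option (Int × Int)) (cn : Nat) =>
            if ((md.getD rn "").toList)[cn]? = some '@' then some ((rn : Int), (cn : Int)) else P) st.2.2)) := by
      funext st rn
      obtain ⟨a, b, c⟩ := st
      rw [← pv_foldl_prod3]
      apply PySem.List.foldl_congr_mem
      intro acc cn _
      obtain ⟨x, y, z⟩ := acc
      split_ifs <;> simp_all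
    rw [hstep]
    exact pv_foldl_prod3
      (fun W rn => (List.range w0).foldl (fun (W : PySem.Set (Int × Int)) (cn : Nat) =>
        if ((md.getD rn "").toList)[cn]? = some '#' then PySem.Set.add W ((rn : Int), (cn : Int)) else W) W)
      (fun B rn => (List.range w0).foldl (fun (B : PySem.Set (Int × Int)) (cn : Nat) =>
        if ((md.getD rn "").toList)[cn]? = some 'O' then PySem.Set.add B ((rn : Int), (cn : Int)) else B) B)
      (fun P rn => (List.range w0).foldl (fun (P : Option (Int × Int)) (cn : Nat) =>
        if ((md.getD rn "").toList)[cn]? = some '@' then some ((rn : Int), (cn : Int)) else P) P)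
      (List.range n) [] [] none
  rw [hsplit]
  -- A's walls / boxes folds, as ofList of a flatMap of per-row filterMaps over range w0
  have hwalls : (List.range n).foldl (fun W rn =>
      (List.range w0).foldl (fun (W : PySem.Set (Int × Int)) (cn : Nat) =>
        if ((md.getD rn "").toList)[cn]? = some '#' then PySem.Set.add W ((rn : Int), (cn : Int)) else W) W) [] =
      PySem.Set.ofList ((List.range n).flatMap (fun rn =>
        (List.range w0).filterMap (fun c =>
          if ((md.getD rn "").toList).getD c ' ' = '#' then some ((rn : Int), (c : Int)) else none))) := by
    rw [PySem.List.foldl_congr_mem _ _ (fun W rn =>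
        PySem.Set.update W ((List.range w0).filterMap (fun c =>
          if ((md.getD rn "").toList).getD c ' ' = '#' then some ((rn : Int), (c : Int)) else none))) _
      (fun W rn hrn => pv_cells_gen _ w0 (hwle rn (List.mem_range.mp hrn)) '#' _
        (List.range w0) (fun c hc => List.mem_range.mp hc) W),
      pv_foldl_update, pv_update_nil]
  have hboxes : (List.range n).foldl (fun B rn =>
      (List.range w0).foldl (fun (B : PySem.Set (Int × Int)) (cn : Nat) =>
        if ((md.getD rn "").toList)[cn]? = some 'O' then PySem.Set.add B ((rn : Int), (cn : Int)) else B) B) [] =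
      PySem.Set.ofList ((List.range n).flatMap (fun rn =>
        (List.range w0).filterMap (fun c =>
          if ((md.getD rn "").toList).getD c ' ' = 'O' then some ((rn : Int), (c : Int)) else none))) := by
    rw [PySem.List.foldl_congr_mem _ _ (fun B rn =>
        PySem.Set.update B ((List.range w0).filterMap (fun c =>
          if ((md.getD rn "").toList).getD c ' ' = 'O' then some ((rn : Int), (c : Int)) else none))) _
      (fun B rn hrn => pv_cells_gen _ w0 (hwle rn (List.mem_range.mp hrn)) 'O' _
        (List.range w0) (fun c hc => List.mem_range.mp hc) B),
      pv_foldl_update, pv_update_nil]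
  rw [hwalls, hboxes]
  refine congrArg₂ _ ?_ (congrArg₂ _ ?_ ?_)
  · refine congrArg PySem.Set.ofList (List.flatMap_congr ?_)
    intro rn hrn
    apply List.filterMap_congr
    intro c hc
    rw [List.mem_range] at hc
    have hc' : c < ((md.getD rn "").toList).length :=
      lt_of_lt_of_le hc (hwle rn (List.mem_range.mp hrn))
    simp only [List.getElem?_eq_getElem hc', Option.getD_some, List.getD_eq_getElem _ _ hc']
  · refine congrArg PySem.Set.ofList (List.flatMap_congr ?_)
    intro rn hrn
    apply List.filterMap_congr
    intro c hc
    rw [List.mem_range] at hc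
    have hc' : c < ((md.getD rn "").toList).length :=
      lt_of_lt_of_le hc (hwle rn (List.mem_range.mp hrn))
    simp only [List.getElem?_eq_getElem hc', Option.getD_some, List.getD_eq_getElem _ _ hc']
  · refine congrArg (fun o => Option.getD o ((0 : Int), (0 : Int))) ?_
    exact (PySem.List.foldl_congr_mem _ _ _ _ (fun P rn hrn =>
      pv_row_bot _ w0 (hwle rn (List.mem_range.mp hrn)) (rn : Int) P)).symm

-- ===== VERDICT (by name: the statement is the Claim_ definition above) =====
theorem get_data_part1_spec : Claim_equal_get_data_part1 := by
  intro md _ hpre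
  unfold Spec_get_data_part1
  exact get_data_part1_eq md hpre
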